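-- pv_equiv track=rewrite | github.com/Windows81/Roblox-Freedom-Distribution | Source/assets/serialisers/csg/csgmdl5.py | read_state_machine
-- ===== SOURCE A (Python) =====
-- def read_state_machine(data: list[int], count: int) -> list[int]:
--     index = 0
--     indices = []
--
--     for _ in range(count):
--         value = data.pop(0)
--         flag7 = value & 0b1000_0000 > 0
--         flag6 = value & 0b0100_0000 > 0
--
--         if flag7:
--             add_lo = data.pop(0)
--             add_hi = data.pop(0)
--             index += add_lo << 0x08
--             index += add_hi << 0x10
--             index += value & 0b0111_1111
--
--         elif flag6:
--             index += (value & 0b0011_1111) - 0x40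
--         else:
--             index += value
--
--         indices.append(index & 0b0111_1111_1111_1111_1111_1111)
--
--     return indices
-- ===== SOURCE B (Python) =====
-- def read_state_machine(data: list[int], count: int) -> list[int]:
--     # Pass 1: parse the byte stream into per-record deltas
--     # (pops bytes from `data` in the same order as the original).
--     deltas = []
--     for _ in range(count):
--         value = data.pop(0)
--         if value & 0b1000_0000:
--             add_lo = data.pop(0)
--             add_hi = data.pop(0)
--             deltas.append((add_lo << 0x08) + (add_hi << 0x10) + (value & 0b0111_1111))
--         elif value & 0b0100_0000:
--             deltas.append((value & 0b0011_1111) - 0x40)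
--         else:
--             deltas.append(value)
--     # Pass 2: running prefix sum of the deltas, masked to 23 bits per output.
--     indices = []
--     total = 0
--     for d in deltas:
--         total += d
--         indices.append(total & 0b0111_1111_1111_1111_1111_1111)
--     return indices
-- ===== Notes on version B (the rewrite author's own statement) =====
-- stated objective: alternative
-- what changed: Splits A's single stateful loop into two passes: one that parses the stream into a list of per-record deltas, and one that takes the masked running prefix sum of that list.
import Mathlib
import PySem

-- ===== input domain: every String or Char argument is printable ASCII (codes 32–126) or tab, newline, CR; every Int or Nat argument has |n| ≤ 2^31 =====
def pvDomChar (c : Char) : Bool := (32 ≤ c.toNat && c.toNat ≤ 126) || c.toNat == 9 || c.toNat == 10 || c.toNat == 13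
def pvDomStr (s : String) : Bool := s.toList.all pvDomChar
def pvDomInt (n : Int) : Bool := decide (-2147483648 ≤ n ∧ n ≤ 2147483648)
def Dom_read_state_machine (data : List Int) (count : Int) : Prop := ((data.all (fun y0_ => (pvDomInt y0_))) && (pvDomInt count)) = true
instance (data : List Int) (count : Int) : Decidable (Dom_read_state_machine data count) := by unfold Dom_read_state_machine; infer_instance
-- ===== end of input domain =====

-- B replaces A's single stateful decode loop by two passes (parse deltas, then masked
-- prefix sum); same cost, return value only is proved equal — B performs the same
-- in-place consumption of `data` as A in Python (both Lean ports are pure).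

-- ===== PORT A =====
-- A's loop state: remaining data, running index, accumulated indices, iterations left.
def pvLoopA : List Int → Int → List Int → Nat → List Int
  | _, _, indices, 0 => indices
  | [], _, indices, _ + 1 => indices        -- data.pop(0) raises here (excluded by Pre_)
  | value :: rest, index, indices, n + 1 =>
    if PySem.Int.band value 128 > 0 then
      match rest with
      | add_lo :: add_hi :: rest2 =>
        let index' := index + (add_lo <<< 8) + (add_hi <<< 16) + PySem.Int.band value 127
        pvLoopA rest2 index' (indices ++ [PySem.Int.band index' 0x7FFFFF]) n
      | _ => indices                        -- data.pop(0) raises here (excluded by Pre_)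
    else if PySem.Int.band value 64 > 0 then
      let index' := index + (PySem.Int.band value 63 - 0x40)
      pvLoopA rest index' (indices ++ [PySem.Int.band index' 0x7FFFFF]) n
    else
      let index' := index + value
      pvLoopA rest index' (indices ++ [PySem.Int.band index' 0x7FFFFF]) n

def read_state_machine (data : List Int) (count : Int) : List Int :=
  pvLoopA data 0 [] count.toNat

-- ===== PORT B =====
-- Pass 1: parse the stream into per-record deltas (same byte-consumption order as A).
def pvDeltas : List Int → Nat → List Int
  | _, 0 => []
  | [], _ + 1 => []                         -- data.pop(0) raises here (excluded by Pre_)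
  | value :: rest, n + 1 =>
    if PySem.Int.band value 128 ≠ 0 then
      match rest with
      | add_lo :: add_hi :: rest2 =>
        ((add_lo <<< 8) + (add_hi <<< 16) + PySem.Int.band value 127) :: pvDeltas rest2 n
      | _ => []                             -- data.pop(0) raises here (excluded by Pre_)
    else if PySem.Int.band value 64 ≠ 0 then
      (PySem.Int.band value 63 - 0x40) :: pvDeltas rest n
    else
      value :: pvDeltas rest n

-- Pass 2: running prefix sum, each total masked to 23 bits.
def pvAccumMask : Int → List Int → List Int
  | _, [] => []
  | total, d :: ds =>
    let total' := total + d
    PySem.Int.band total' 0x7FFFFF :: pvAccumMask total' ds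

def read_state_machine_alt (data : List Int) (count : Int) : List Int :=
  pvAccumMask 0 (pvDeltas data count.toNat)

-- ===== PRECONDITION & SPEC =====
-- The minimal framing condition on the input bytes: each of the `count` records has its
-- header byte present, and a record whose header has bit 7 set has its two extra bytes.
-- Exactly where this fails, Python A raises IndexError (pop from empty list).
def pvEnough : List Int → Nat → Bool
  | _, 0 => true
  | [], _ + 1 => false
  | value :: rest, n + 1 =>
    if PySem.Int.band value 128 ≠ 0 then
      2 ≤ rest.length && pvEnough (rest.drop 2) n
    else pvEnough rest n

def Pre_read_state_machine (data : List Int) (count : Int) : Prop :=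
  pvEnough data count.toNat = true
instance (data : List Int) (count : Int) : Decidable (Pre_read_state_machine data count) := by
  unfold Pre_read_state_machine; infer_instance

def pvWitness_read_state_machine : List Int × Int := ([0x85, 1, 2, 0x41, 5], 3)

def Spec_read_state_machine (data : List Int) (count : Int) (out : List Int) : Prop := out = read_state_machine_alt data count
instance (data : List Int) (count : Int) (out : List Int) : Decidable (Spec_read_state_machine data count out) := by unfold Spec_read_state_machine; infer_instance

-- ===== CLAIM (what is proved, stated in full; the proofs are below) =====
def Claim_equal_read_state_machine : Prop := ∀ (data : List Int) (count : Int), Dom_read_state_machine data count → Pre_read_state_machine data count → Spec_read_state_machine data count (read_state_machine data count)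

-- ===== LEMMAS AND PROOFS =====

-- A's loop, started at `index` with `indices` already emitted, appends exactly the masked
-- prefix sums (from `index`) of the deltas B's first pass parses.
theorem pvBandMaskNonneg (v m : Int) (hm : 0 ≤ m) : 0 ≤ PySem.Int.band v m := by
  rw [PySem.Int.band_comm]; exact PySem.Int.band_nonneg_of_nonneg_left v hm

theorem pvLoopA_eq_accum (n : Nat) :
    ∀ (data : List Int) (index : Int) (indices : List Int),
      pvEnough data n = true →
      pvLoopA data index indices n = indices ++ pvAccumMask index (pvDeltas data n) := by
  induction n with
  | zero => intro data index indices _; simp [pvLoopA, pvDeltas, pvAccumMask]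
  | succ n ih =>
    intro data index indices h
    match data with
    | [] => simp [pvEnough] at h
    | value :: rest =>
      by_cases h7 : PySem.Int.band value 128 = 0
      · have h7' : ¬ PySem.Int.band value 128 > 0 := by omega
        have hen : pvEnough rest n = true := by simpa [pvEnough, h7] using h
        by_cases h6 : PySem.Int.band value 64 = 0
        · have h6' : ¬ PySem.Int.band value 64 > 0 := by omega
          rcases rest with _ | ⟨b1, _ | ⟨b2, r2⟩⟩ <;>
            simp [pvLoopA, pvDeltas, h7, h6, ih _ _ _ hen, pvAccumMask]
        · have h6' : PySem.Int.band value 64 > 0 := by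
            have := pvBandMaskNonneg value 64 (by norm_num); omega
          rcases rest with _ | ⟨b1, _ | ⟨b2, r2⟩⟩ <;>
            simp [pvLoopA, pvDeltas, h6', h7, h6, ih _ _ _ hen, pvAccumMask]
      · have h7' : PySem.Int.band value 128 > 0 := by
          have := pvBandMaskNonneg value 128 (by norm_num); omega
        match rest with
        | [] => simp [pvEnough, h7] at h
        | [_] => simp [pvEnough, h7] at h
        | add_lo :: add_hi :: rest2 =>
          have hen : pvEnough rest2 n = true := by simpa [pvEnough, h7] using h
          have harith : index + (add_lo <<< 8) + (add_hi <<< 16) + PySem.Int.band value 127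
              = index + ((add_lo <<< 8) + (add_hi <<< 16) + PySem.Int.band value 127) := by ring
          simp [pvLoopA, pvDeltas, h7', h7, ih _ _ _ hen, pvAccumMask, harith]

-- ===== VERDICT (by name: the statement is the Claim_ definition above) =====
theorem read_state_machine_spec : Claim_equal_read_state_machine := by
  intro data count _ hpre
  unfold Spec_read_state_machine read_state_machine read_state_machine_alt
  simpa using pvLoopA_eq_accum count.toNat data 0 [] hpre
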